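-- pv_equiv track=rewrite | github.com/theFoxTale/learn-python | lesson-3/3_test_dict.py | get_names_count
-- ===== SOURCE A (Python) =====
-- def get_names_count(std_list):
--     names_list = {}
--     for student in std_list:
--         name = student['first_name']
--         if name not in names_list:
--             names_list[name] = 0
--         names_list[name] += 1
--     return names_list
-- ===== SOURCE B (Python) =====
-- def get_names_count(std_list):
--     names = [student['first_name'] for student in std_list]
--     return {name: names.count(name) for name in dict.fromkeys(names)}
-- ===== Notes on version B (the rewrite author's own statement) =====
-- stated objective: simpler
-- what changed: Replaces the running dict accumulation (membership test, zero-init, increment) with a two-step comprehension: extract the first names, then build {name: names.count(name)} over the ordered-deduplicated names.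
import Mathlib
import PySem

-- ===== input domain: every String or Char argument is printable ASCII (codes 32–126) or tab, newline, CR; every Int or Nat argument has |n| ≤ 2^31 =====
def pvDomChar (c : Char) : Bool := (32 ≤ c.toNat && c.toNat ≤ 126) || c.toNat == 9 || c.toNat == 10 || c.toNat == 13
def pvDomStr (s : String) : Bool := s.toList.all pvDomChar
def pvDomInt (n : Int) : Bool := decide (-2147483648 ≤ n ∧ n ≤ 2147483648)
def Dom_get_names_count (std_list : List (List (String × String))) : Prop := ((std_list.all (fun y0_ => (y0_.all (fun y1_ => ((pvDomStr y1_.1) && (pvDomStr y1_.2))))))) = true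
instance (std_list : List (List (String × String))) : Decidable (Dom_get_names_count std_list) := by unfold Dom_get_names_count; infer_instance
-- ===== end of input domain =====

-- B replaces A's running dict accumulation with: extract the first names, then map each
-- first-occurrence-deduplicated name to its count (simpler decomposition; return value only).

-- ===== PORT A =====
-- student['first_name'] is a dict lookup (KeyError when absent → excluded by Pre_);
-- the .getD "" default is never reached under Pre_. names_list[name] += 1 is ported as
-- insert name (current value + 1).
def pvStepA (names_list : PySem.Dict String Int) (student : List (String × String)) :
    PySem.Dict String Int :=
  let name := ((PySem.Dict.mk student).get? "first_name").getD ""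
  let names_list := if names_list.contains name then names_list else names_list.insert name 0
  names_list.insert name (names_list.getD name 0 + 1)

def get_names_count (std_list : List (List (String × String))) : List (String × Int) :=
  (std_list.foldl pvStepA PySem.Dict.empty).items

-- ===== PORT B =====
def get_names_count_alt (std_list : List (List (String × String))) : List (String × Int) :=
  let names := std_list.map (fun student => ((PySem.Dict.mk student).get? "first_name").getD "")
  (PySem.List.dedup names).map (fun name => (name, (names.count name : Int)))

-- ===== PRECONDITION & SPEC =====
-- Pre_ excludes only inputs where A raises KeyError: a student dict without the key 'first_name'.
def Pre_get_names_count (std_list : List (List (String × String))) : Prop :=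
  ∀ student ∈ std_list, "first_name" ∈ student.map (·.1)

instance (std_list : List (List (String × String))) : Decidable (Pre_get_names_count std_list) := by
  unfold Pre_get_names_count; infer_instance

def pvWitness_get_names_count : (List (List (String × String))) :=
  [[("first_name", "Ann")], [("first_name", "Bob"), ("last_name", "Lee")]]

def Spec_get_names_count (std_list : List (List (String × String))) (out : List (String × Int)) : Prop := out = get_names_count_alt std_list
instance (std_list : List (List (String × String))) (out : List (String × Int)) : Decidable (Spec_get_names_count std_list out) := by unfold Spec_get_names_count; infer_instance

-- ===== CLAIM (what is proved, stated in full; the proofs are below) =====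
def Claim_equal_get_names_count : Prop := ∀ (std_list : List (List (String × String))), Dom_get_names_count std_list → Pre_get_names_count std_list → Spec_get_names_count std_list (get_names_count std_list)

-- ===== LEMMAS AND PROOFS =====

-- A's loop body equals the plain Counter step: the zero-initialisation branch folds away.
theorem get_names_count_step (d : PySem.Dict String Int) (student : List (String × String)) :
    pvStepA d student
    = d.insert (((PySem.Dict.mk student).get? "first_name").getD "")
        (d.getD (((PySem.Dict.mk student).get? "first_name").getD "") 0 + 1) := by
  unfold pvStepA
  by_cases h : d.contains (((PySem.Dict.mk student).get? "first_name").getD "") = true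
  · simp [h]
  · simp only [Bool.not_eq_true] at h
    simp [h, PySem.Dict.getD_insert_self, PySem.Dict.insert_insert_self,
      PySem.Dict.getD_of_not_contains]

-- A's whole loop is the Counter loop over the extracted names.
theorem get_names_count_fold (l : List (List (String × String))) (d : PySem.Dict String Int) :
    l.foldl pvStepA d
    = (l.map (fun student => ((PySem.Dict.mk student).get? "first_name").getD "")).foldl
        (fun d x => d.insert x (d.getD x 0 + 1)) d := by
  induction l generalizing d with
  | nil => rfl
  | cons s t ih =>
    rw [List.foldl_cons, List.map_cons, List.foldl_cons, get_names_count_step, ih]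

theorem get_names_count_spec : Claim_equal_get_names_count := by
  intro std_list _ _
  unfold Spec_get_names_count get_names_count get_names_count_alt
  rw [get_names_count_fold, PySem.Dict.foldl_insert_getD_add_one_eq_counter,
    PySem.Dict.items_counter]
  simp [PySem.List.dedup_eq_ofList]
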